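-- pv_equiv track=rewrite | github.com/TeaSings/Our-Statistical-Modeling-Competition-Paper | src/platforms/job51/we_search_client.py | _unsbox_waf_arg
-- ===== SOURCE A (Python) =====
-- def _unsbox_waf_arg(arg: str) -> str:
--     order = [
--         15,
--         35,
--         29,
--         24,
--         33,
--         16,
--         1,
--         38,
--         10,
--         9,
--         19,
--         31,
--         40,
--         27,
--         22,
--         23,
--         25,
--         13,
--         6,
--         11,
--         39,
--         18,
--         20,
--         8,
--         14,
--         21,
--         32,
--         26,
--         2,
--         30,
--         7,
--         4,
--         17,
--         5,
--         3,
--         28,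
--         34,
--         37,
--         12,
--         36,
--     ]
--     output = [""] * len(order)
--     for index, ch in enumerate(arg):
--         for target_index, target in enumerate(order):
--             if target == index + 1:
--                 output[target_index] = ch
--                 break
--     return "".join(output)
-- ===== SOURCE B (Python) =====
-- def _unsbox_waf_arg(arg: str) -> str:
--     order = [
--         15, 35, 29, 24, 33, 16, 1, 38, 10, 9,
--         19, 31, 40, 27, 22, 23, 25, 13, 6, 11,
--         39, 18, 20, 8, 14, 21, 32, 26, 2, 30,
--         7, 4, 17, 5, 3, 28, 34, 37, 12, 36,
--     ]
--     n = len(arg)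
--     return "".join(arg[o - 1] if o - 1 < n else "" for o in order)
-- ===== Notes on version B (the rewrite author's own statement) =====
-- stated objective: simpler
-- what changed: Replaces A's scatter with an inner linear search of the permutation table per input character by a single gather pass: each output slot directly reads arg[order[j]-1] when that index exists.
import Mathlib
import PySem

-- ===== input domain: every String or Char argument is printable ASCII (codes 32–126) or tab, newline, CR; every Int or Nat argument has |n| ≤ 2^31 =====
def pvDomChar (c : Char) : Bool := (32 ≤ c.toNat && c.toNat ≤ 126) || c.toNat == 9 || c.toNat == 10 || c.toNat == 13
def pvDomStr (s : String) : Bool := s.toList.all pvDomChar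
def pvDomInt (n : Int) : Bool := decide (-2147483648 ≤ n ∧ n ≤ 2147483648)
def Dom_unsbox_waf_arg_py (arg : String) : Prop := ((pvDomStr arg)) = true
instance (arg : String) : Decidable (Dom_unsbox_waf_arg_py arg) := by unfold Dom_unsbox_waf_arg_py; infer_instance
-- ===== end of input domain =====

-- B is a single gather pass (output[j] = arg[order[j]-1] when in range) instead of
-- A's scatter with an inner linear search of the table per input character: simpler.

-- the fixed permutation table (the same literal in both Python versions)
def pvOrder : List Int :=
  [15, 35, 29, 24, 33, 16, 1, 38, 10, 9,
   19, 31, 40, 27, 22, 23, 25, 13, 6, 11,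
   39, 18, 20, 8, 14, 21, 32, 26, 2, 30,
   7, 4, 17, 5, 3, 28, 34, 37, 12, 36]

-- ===== PORT A =====
-- inner 'for target_index, target in enumerate(order): if target == index+1: output[target_index] = ch; break'
def pvInner (out : List String) (ord : List Int) (ti : Nat) (i : Int) (ch : Char) : List String :=
  match ord with
  | [] => out
  | t :: rest => if t = i + 1 then out.set ti (String.mk [ch]) else pvInner out rest (ti + 1) i ch

def unsbox_waf_arg_py (arg : String) : String :=
  let output := List.replicate pvOrder.length ""
  let out := (PySem.List.enumerate arg.toList).foldl (fun acc p => pvInner acc pvOrder 0 p.1 p.2) output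
  String.join out

-- ===== PORT B =====
def unsbox_waf_arg_py_alt (arg : String) : String :=
  let cs := arg.toList
  String.join (pvOrder.map (fun o => if o - 1 < (cs.length : Int) then String.mk [cs.getD (o - 1).toNat default] else ""))

-- ===== PRECONDITION & SPEC =====
def Spec_unsbox_waf_arg_py (arg : String) (out : String) : Prop := out = unsbox_waf_arg_py_alt arg
instance (arg : String) (out : String) : Decidable (Spec_unsbox_waf_arg_py arg out) := by unfold Spec_unsbox_waf_arg_py; infer_instance

-- ===== CLAIM (what is proved, stated in full; the proofs are below) =====
def Claim_equal_unsbox_waf_arg_py : Prop := ∀ (arg : String), Dom_unsbox_waf_arg_py arg → Spec_unsbox_waf_arg_py arg (unsbox_waf_arg_py arg)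

-- ===== LEMMAS AND PROOFS =====

-- A's fold, as a function of the character list
def pvFoldA (cs : List Char) : List String :=
  (PySem.List.enumerate cs).foldl (fun acc p => pvInner acc pvOrder 0 p.1 p.2) (List.replicate pvOrder.length "")

-- B's map, as a function of the character list
def pvMapB (cs : List Char) : List String :=
  pvOrder.map (fun o => if o - 1 < (cs.length : Int) then String.mk [cs.getD (o - 1).toNat default] else "")

lemma pvInner_eq (out : List String) (ord : List Int) (ti : Nat) (i : Int) (ch : Char) :
    pvInner out ord ti i ch =
      match ord.idxOf? (i + 1) with
      | some k => out.set (ti + k) (String.mk [ch])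
      | none => out := by
  induction ord generalizing ti with
  | nil => simp [pvInner, List.idxOf?]
  | cons t rest ih =>
    by_cases h : t = i + 1
    · simp [pvInner, h, List.idxOf?_cons]
    · have h' : ¬ (i + 1 = t) := fun e => h e.symm
      simp only [pvInner, if_neg h, ih (ti + 1), List.idxOf?_cons, beq_iff_eq]
      cases hk : rest.idxOf? (i + 1) with
      | none => simp
      | some k => simp [Nat.add_assoc, Nat.add_comm 1 k]

lemma pvOrder_mem_bounds : ∀ o ∈ pvOrder, 1 ≤ o ∧ o ≤ 40 := by decide

lemma pvOrder_nodup : pvOrder.Nodup := by decide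

lemma pvOrder_mem_of_lt : ∀ n : Nat, n < 40 → ((n : Int) + 1) ∈ pvOrder := by decide

lemma pvFoldA_append (cs : List Char) (c : Char) :
    pvFoldA (cs ++ [c]) = pvInner (pvFoldA cs) pvOrder 0 (cs.length : Int) c := by
  simp [pvFoldA, PySem.List.enumerate_append, List.foldl_append, PySem.List.enumerate]

lemma pvMain (cs : List Char) : pvFoldA cs = pvMapB cs := by
  induction cs using List.reverseRecOn with
  | nil => decide
  | append_singleton cs c ih =>
    rw [pvFoldA_append, ih, pvInner_eq]
    by_cases hn : cs.length < 40
    · -- the new character lands exactly in the slot holding the value cs.length+1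
      have hmem : ((cs.length : Int) + 1) ∈ pvOrder := pvOrder_mem_of_lt _ hn
      obtain ⟨k, hk⟩ : ∃ k, pvOrder.idxOf? ((cs.length : Int) + 1) = some k := by
        cases h : pvOrder.idxOf? ((cs.length : Int) + 1) with
        | none => exact absurd hmem (List.idxOf?_eq_none_iff.mp h)
        | some k => exact ⟨k, rfl⟩
      obtain ⟨hklen, hkval, -⟩ := List.idxOf?_eq_some_iff.mp hk
      rw [hk]
      apply List.ext_getElem
      · simp [pvMapB]
      · intro j hj1 hj2
        have hjo : j < pvOrder.length := by
          simpa [pvMapB] using hj1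
        simp only [Nat.zero_add, List.getElem_set, pvMapB, List.getElem_map]
        by_cases hjk : k = j
        · subst hjk
          rw [if_pos rfl, hkval]
          have hc1 : (cs.length : Int) + 1 - 1 < ((cs ++ [c]).length : Int) := by
            simp only [List.length_append, List.length_singleton]; push_cast; omega
          rw [if_pos hc1]
          simp [List.getD]
        · rw [if_neg hjk]
          have hne : pvOrder[j] ≠ (cs.length : Int) + 1 := by
            intro he
            exact hjk ((List.Nodup.getElem_inj_iff pvOrder_nodup).mp (hkval.trans he.symm))
          have hb := pvOrder_mem_bounds pvOrder[j] (List.getElem_mem hjo)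
          by_cases hlt : pvOrder[j] - 1 < (cs.length : Int)
          · have hlt' : pvOrder[j] - 1 < ((cs ++ [c]).length : Int) := by simp only [List.length_append, List.length_singleton]; push_cast; omega
            rw [if_pos hlt, if_pos hlt']
            have h2 : pvOrder[j].toNat - 1 < cs.length := by omega
            simp [List.getD, List.getElem?_append_left h2]
          · have hge : (cs.length : Int) + 1 ≤ pvOrder[j] - 1 := by
              rcases lt_or_ge (pvOrder[j] - 1) ((cs.length : Int) + 1) with h | h
              · exact absurd (by omega : pvOrder[j] = (cs.length : Int) + 1) hne
              · exact h
            have hlt' : ¬ pvOrder[j] - 1 < ((cs ++ [c]).length : Int) := by simp only [List.length_append, List.length_singleton]; push_cast; omega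
            rw [if_neg hlt, if_neg hlt']
    · -- every table entry is ≤ 40 ≤ cs.length: the new character is dropped by both programs
      have hnone : pvOrder.idxOf? ((cs.length : Int) + 1) = none := by
        rw [List.idxOf?_eq_none_iff]
        intro hmem
        have := (pvOrder_mem_bounds _ hmem).2
        omega
      rw [hnone]
      unfold pvMapB
      apply List.map_congr_left
      intro o ho
      have hb := pvOrder_mem_bounds o ho
      have hlt : o - 1 < (cs.length : Int) := by omega
      have hlt' : o - 1 < ((cs ++ [c]).length : Int) := by simp only [List.length_append, List.length_singleton]; push_cast; omega
      rw [if_pos hlt, if_pos hlt']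
      have h2 : o.toNat - 1 < cs.length := by omega
      simp [List.getD, List.getElem?_append_left h2]

-- ===== VERDICT (by name: the statement is the Claim_ definition above) =====
theorem unsbox_waf_arg_py_spec : Claim_equal_unsbox_waf_arg_py := by
  intro arg _
  unfold Spec_unsbox_waf_arg_py unsbox_waf_arg_py unsbox_waf_arg_py_alt
  exact congrArg String.join (pvMain arg.toList)
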